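-- pv_equiv track=rewrite | github.com/CalippoSlush/adventcode2025 | Day4.py | part2
-- ===== SOURCE A (Python) =====
-- def find_removes(test,size):
--     remove =[]
--     for i in range(len(test)):
--         total = 0
--         if test[i] == "@":
--             if i % size == 0:
--                 index_check = [-size, -size + 1, 1, size, size + 1]
--             elif i % size == size - 1:
--                 index_check = [-size - 1, -size, -1, size - 1, size]
--             else:
--                 index_check = [-size - 1, -size, -size + 1, -1, 1, size - 1, size, size + 1]
--             for j in index_check:
--                 ID = i + j
--                 if ID < 0 or ID >= len(test):
--                     continue
--                 if test[ID] == "@":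
--                     total += 1
--             if total < 4:
--
--                 remove.append(i)
--     return remove
--
-- def removed(test,index):
--     for i in index:
--         test[i]= "."
--     return test
--
-- def part2(test,size):
--     can_rem = find_removes(test, size)
--     total = 0
--     while len(can_rem)>0:
--         can_rem = find_removes(test,size)
--         total+= len(can_rem)
--         test = removed(test,can_rem)
--     return total
-- ===== SOURCE B (Python) =====
-- def part2(test, size):
--     # Worklist erosion: precompute neighbour lists and a reverse-neighbour index
--     # once, then remove cells one at a time, re-checking only the cells whose
--     # neighbour was just removed.  Does not mutate `test` (A overwrites removed
--     # cells with "." in place); return value is the same.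
--     n = len(test)
--     nbrs = []
--     for i in range(n):
--         if i % size == 0:
--             offs = [-size, -size + 1, 1, size, size + 1]
--         elif i % size == size - 1:
--             offs = [-size - 1, -size, -1, size - 1, size]
--         else:
--             offs = [-size - 1, -size, -size + 1, -1, 1, size - 1, size, size + 1]
--         nbrs.append([i + j for j in offs if 0 <= i + j < n])
--     rev = {}
--     for i in range(n):
--         for t in nbrs[i]:
--             rev.setdefault(t, []).append(i)
--     live = [c == "@" for c in test]
--     stack = list(range(n))
--     total = 0
--     while stack:
--         i = stack.pop()
--         if live[i] and sum(1 for t in nbrs[i] if live[t]) < 4: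
--             live[i] = False
--             total += 1
--             stack.extend(rev.get(i, []))
--     return total
-- ===== Notes on version B (the rewrite author's own statement) =====
-- stated objective: alternative
-- what changed: A rescans the whole grid every erosion round (find_removes over all cells, repeated until a round removes nothing); B builds neighbour and reverse-neighbour indexes once and runs a worklist that removes cells one at a time, re-checking only cells whose neighbour was just removed.
-- outside the precondition, e.g. on part2(['.'], 0): A returns 0, B raises ZeroDivisionError
import Mathlib
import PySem

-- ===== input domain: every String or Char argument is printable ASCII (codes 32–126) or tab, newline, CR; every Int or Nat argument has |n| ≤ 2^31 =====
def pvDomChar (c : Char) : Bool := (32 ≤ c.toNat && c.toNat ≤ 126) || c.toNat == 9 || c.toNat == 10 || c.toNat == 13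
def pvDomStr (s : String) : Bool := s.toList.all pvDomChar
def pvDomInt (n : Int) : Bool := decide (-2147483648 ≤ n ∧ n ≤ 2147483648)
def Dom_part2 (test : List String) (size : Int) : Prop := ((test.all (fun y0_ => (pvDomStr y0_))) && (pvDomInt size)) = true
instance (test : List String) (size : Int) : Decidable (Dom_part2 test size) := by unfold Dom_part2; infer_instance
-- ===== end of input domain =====

-- B replaces A's repeated whole-grid erosion rounds by a one-pass worklist over a
-- precomputed reverse-neighbour index (equality is about the return value only:
-- A overwrites removed cells of `test` with "." in place, B does not mutate it).

-- ===== PORT A =====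
def indexCheck (size i : Int) : List Int :=
  if PySem.Int.mod i size == 0 then [-size, -size + 1, 1, size, size + 1]
  else if PySem.Int.mod i size == size - 1 then [-size - 1, -size, -1, size - 1, size]
  else [-size - 1, -size, -size + 1, -1, 1, size - 1, size, size + 1]

def cellTotal (test : List String) (size i : Int) : Int :=
  (indexCheck size i).foldl (fun total j =>
    if i + j < 0 ∨ i + j ≥ PySem.List.len test then total
    else if PySem.List.pyGetD test (i + j) "" == "@" then total + 1 else total) 0

def findRemoves (test : List String) (size : Int) : List Int :=
  (PySem.List.pyRange 0 (PySem.List.len test) 1).foldl (fun remove i =>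
    if PySem.List.pyGetD test i "" == "@" then
      if cellTotal test size i < 4 then remove ++ [i] else remove
    else remove) []

def removedFn (test : List String) (index : List Int) : List String :=
  index.foldl (fun t i => PySem.List.pySetD t i ".") test

def part2Loop (size : Int) : Nat → List String → List Int → Int → Int
  | 0, _, _, total => total
  | fuel+1, test, canRem, total =>
    if canRem.length > 0 then
      let r := findRemoves test size
      part2Loop size fuel (removedFn test r) r (total + PySem.List.len r)
    else total

def part2 (test : List String) (size : Int) : Int :=
  part2Loop size (test.length + 2) test (findRemoves test size) 0

-- ===== PORT B =====
def buildNbrs (test : List String) (size : Int) : List (List Int) :=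
  (PySem.List.pyRange 0 (PySem.List.len test) 1).foldl (fun nbrs i =>
    let offs :=
      if PySem.Int.mod i size == 0 then [-size, -size + 1, 1, size, size + 1]
      else if PySem.Int.mod i size == size - 1 then [-size - 1, -size, -1, size - 1, size]
      else [-size - 1, -size, -size + 1, -1, 1, size - 1, size, size + 1]
    nbrs ++ [(offs.filter (fun j => decide (0 ≤ i + j) && decide (i + j < PySem.List.len test))).map
               (fun j => i + j)]) []

def buildRev (n : Int) (nbrs : List (List Int)) : PySem.Dict Int (List Int) :=
  (PySem.List.pyRange 0 n 1).foldl (fun rev i =>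
    (PySem.List.pyGetD nbrs i []).foldl (fun rev t => rev.modify t [] (fun l => l ++ [i])) rev)
    PySem.Dict.empty

def altLoop (nbrs : List (List Int)) (rev : PySem.Dict Int (List Int)) :
    Nat → List Bool → List Int → Int → Int
  | 0, _, _, total => total
  | fuel+1, live, stack, total =>
    match stack.getLast? with
    | none => total
    | some i =>
      if PySem.List.pyGetD live i false = true ∧
         (((PySem.List.pyGetD nbrs i []).countP (fun t => PySem.List.pyGetD live t false) : Int) < 4)
      then altLoop nbrs rev fuel (PySem.List.pySetD live i false)
             (stack.dropLast ++ rev.getD i []) (total + 1)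
      else altLoop nbrs rev fuel live stack.dropLast total

def part2_alt (test : List String) (size : Int) : Int :=
  let n := PySem.List.len test
  let nbrs := buildNbrs test size
  let rev := buildRev n nbrs
  let live := test.map (fun c => c == "@")
  let stack := PySem.List.pyRange 0 n 1
  altLoop nbrs rev (stack.length + (nbrs.map List.length).sum + 1) live stack 0

-- ===== PRECONDITION & SPEC =====
-- Pre_ excludes size = 0, on which the neighbour rule 'i % size' is undefined: A raises
-- ZeroDivisionError whenever the grid contains an "@" and returns (0) only on degenerate
-- "@"-free grids, while B's up-front neighbour precomputation divides by size unconditionally.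
def Pre_part2 (test : List String) (size : Int) : Prop := size ≠ 0
instance (test : List String) (size : Int) : Decidable (Pre_part2 test size) := by
  unfold Pre_part2; infer_instance

def pvWitness_part2 : List String × Int := (["@", "@", ".", "@"], 2)

def Spec_part2 (test : List String) (size : Int) (out : Int) : Prop := out = part2_alt test size
instance (test : List String) (size : Int) (out : Int) : Decidable (Spec_part2 test size out) := by
  unfold Spec_part2; infer_instance

-- ===== CLAIM (what is proved, stated in full; the proofs are below) =====
def Claim_equal_part2 : Prop := ∀ (test : List String) (size : Int),
  Dom_part2 test size → Pre_part2 test size → Spec_part2 test size (part2 test size)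

-- ===== LEMMAS AND PROOFS =====

-- ---- the common model: Bool grids, one-cell removal steps ----
def liveOfG (g : List String) : List Bool := g.map (fun c => c == "@")

def nbrCells (n size i : Int) : List Int :=
  ((indexCheck size i).filter (fun j => decide (0 ≤ i + j) && decide (i + j < n))).map
    (fun j => i + j)

def degM (n size : Int) (live : List Bool) (i : Int) : Nat :=
  (nbrCells n size i).countP (fun t => PySem.List.pyGetD live t false)

def Rm (n size : Int) (live : List Bool) (i : Int) : Prop :=
  0 ≤ i ∧ i < n ∧ PySem.List.pyGetD live i false = true ∧ degM n size live i < 4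

def setF (live : List Bool) (i : Int) : List Bool := PySem.List.pySetD live i false

def StepR (n size : Int) (live live' : List Bool) : Prop :=
  ∃ i, Rm n size live i ∧ live' = setF live i

def NoRem (n size : Int) (live : List Bool) : Prop := ∀ i, ¬ Rm n size live i

def leL (a b : List Bool) : Prop :=
  ∀ t : Int, 0 ≤ t → PySem.List.pyGetD a t false = true → PySem.List.pyGetD b t false = true

def lc (live : List Bool) : Nat := live.countP id

-- basic get/set facts
theorem getD_setF_self (live : List Bool) (i : Int) (h0 : 0 ≤ i)
    (h1 : i.toNat < live.length) :
    PySem.List.pyGetD (setF live i) i false = false := by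
  rw [setF, PySem.List.pySetD_of_nonneg _ _ h0, PySem.List.pyGetD_of_nonneg _ _ h0,
    List.getD_eq_getElem?_getD, List.getElem?_set]
  simp [h1]

theorem getD_setF_other (live : List Bool) (i t : Int) (h0 : 0 ≤ i) (ht : 0 ≤ t)
    (hne : t ≠ i) : PySem.List.pyGetD (setF live i) t false = PySem.List.pyGetD live t false := by
  rw [setF, PySem.List.pySetD_of_nonneg _ _ h0, PySem.List.pyGetD_of_nonneg _ _ ht,
    PySem.List.pyGetD_of_nonneg _ _ ht, List.getD_eq_getElem?_getD, List.getD_eq_getElem?_getD,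
    List.getElem?_set]
  have : i.toNat ≠ t.toNat := by omega
  simp [this]

theorem getD_setF_true_imp {live : List Bool} {i t : Int} (h0 : 0 ≤ i) (ht : 0 ≤ t)
    (h : PySem.List.pyGetD (setF live i) t false = true) :
    PySem.List.pyGetD live t false = true := by
  by_cases hne : t = i
  · subst hne
    rw [setF, PySem.List.pySetD_of_nonneg _ _ h0, PySem.List.pyGetD_of_nonneg _ _ ht,
      List.getD_eq_getElem?_getD, List.getElem?_set] at h
    rw [PySem.List.pyGetD_of_nonneg _ _ ht, List.getD_eq_getElem?_getD]
    by_cases hcase : t.toNat < live.length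
    · simp [hcase] at h
    · simpa [hcase] using h
  · rwa [getD_setF_other live i t h0 ht hne] at h

theorem length_setF (live : List Bool) (i : Int) : (setF live i).length = live.length := by
  simpa [setF] using PySem.List.length_pySetD live i false

theorem mem_nbrCells_bounds {n size i t : Int} (h : t ∈ nbrCells n size i) : 0 ≤ t ∧ t < n := by
  simp only [nbrCells, List.mem_map, List.mem_filter, Bool.and_eq_true, decide_eq_true_eq] at h
  obtain ⟨j, ⟨-, hj1, hj2⟩, rfl⟩ := h
  exact ⟨hj1, hj2⟩

theorem live_in_range {live : List Bool} {i : Int} {N : Nat} (hlen : live.length = N)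
    (h : PySem.List.pyGetD live i false = true) (h0 : 0 ≤ i) : i.toNat < N := by
  by_contra hcon
  rw [PySem.List.pyGetD_of_nonneg _ _ h0, List.getD_eq_getElem?_getD,
    List.getElem?_eq_none (by omega)] at h
  simp at h

theorem deg_mono {n size : Int} {a b : List Bool} (h : leL a b) (i : Int) :
    degM n size a i ≤ degM n size b i := by
  refine List.countP_mono_left (fun t hmem hta => ?_)
  exact h t (mem_nbrCells_bounds hmem).1 hta

theorem step_le {n size : Int} {live live' : List Bool} (h : StepR n size live live') :
    leL live' live := by
  obtain ⟨i, hr, rfl⟩ := h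
  exact fun t ht htrue => getD_setF_true_imp hr.1 ht htrue

theorem star_le {n size : Int} {live f : List Bool}
    (h : Relation.ReflTransGen (StepR n size) live f) : leL f live := by
  induction h with
  | refl => exact fun t _ htrue => htrue
  | tail _ hstep ih => exact fun t ht htrue => ih t ht (step_le hstep t ht htrue)

theorem star_len {n size : Int} {live f : List Bool}
    (h : Relation.ReflTransGen (StepR n size) live f) : f.length = live.length := by
  induction h with
  | refl => rfl
  | tail _ hstep ih =>
    obtain ⟨i, _, rfl⟩ := hstep
    rw [length_setF]; exact ih

theorem step_lc {n size : Int} {live : List Bool} {i : Int} (hr : Rm n size live i)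
    (hlen : live.length = n.toNat) : lc (setF live i) + 1 = lc live := by
  obtain ⟨h0, h1, htrue, -⟩ := hr
  have hin : i.toNat < live.length := live_in_range rfl htrue h0
  have hget : live[i.toNat] = true := by
    rw [PySem.List.pyGetD_of_nonneg _ _ h0, List.getD_eq_getElem?_getD,
      List.getElem?_eq_getElem hin] at htrue
    simpa using htrue
  rw [lc, setF, PySem.List.pySetD_of_nonneg _ _ h0, List.countP_set hin]
  simp [lc, hget]
  have : 1 ≤ live.countP id := by
    have := List.countP_pos_iff (p := id) (l := live)
    exact this.2 ⟨live[i.toNat], List.getElem_mem hin, by simpa using hget⟩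
  omega

theorem preserve_step {n size : Int} {h live live' : List Bool} (hs : NoRem n size h)
    (hle : leL h live) (st : StepR n size live live') : leL h live' := by
  obtain ⟨i, hr, rfl⟩ := st
  have hhi : ¬ PySem.List.pyGetD h i false = true := by
    intro hhi
    have hdeg : ¬ degM n size h i < 4 := by
      intro hlt
      exact hs i ⟨hr.1, hr.2.1, hhi, hlt⟩
    have : degM n size h i ≤ degM n size live i := deg_mono hle i
    exact hdeg (lt_of_le_of_lt this hr.2.2.2)
  intro t ht htrue
  have hne : t ≠ i := by rintro rfl; exact hhi htrue
  rw [getD_setF_other live i t hr.1 ht hne]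
  exact hle t ht htrue

theorem preserve_star {n size : Int} {h live f : List Bool} (hs : NoRem n size h)
    (hle : leL h live) (st : Relation.ReflTransGen (StepR n size) live f) : leL h f := by
  induction st with
  | refl => exact hle
  | tail _ hstep ih => exact preserve_step hs ih hstep

theorem uniq_lc {n size : Int} {live f₁ f₂ : List Bool} (hlen : live.length = n.toNat)
    (s1 : Relation.ReflTransGen (StepR n size) live f₁) (h1 : NoRem n size f₁)
    (s2 : Relation.ReflTransGen (StepR n size) live f₂) (h2 : NoRem n size f₂) :
    lc f₁ = lc f₂ := by
  have le12 : leL f₁ f₂ := preserve_star h1 (star_le s1) s2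
  have le21 : leL f₂ f₁ := preserve_star h2 (star_le s2) s1
  have hlen1 := star_len s1
  have hlen2 := star_len s2
  have : f₁ = f₂ := by
    apply List.ext_getElem (by omega)
    intro k hk1 hk2
    have g1 : PySem.List.pyGetD f₁ (k : Int) false = f₁[k] := by
      rw [PySem.List.pyGetD_of_nonneg _ _ (by omega)]
      simp [List.getD_eq_getElem?_getD, List.getElem?_eq_getElem hk1]
    have g2 : PySem.List.pyGetD f₂ (k : Int) false = f₂[k] := by
      rw [PySem.List.pyGetD_of_nonneg _ _ (by omega)]
      simp [List.getD_eq_getElem?_getD, List.getElem?_eq_getElem hk2]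
    have i12 := le12 (k : Int) (by omega)
    have i21 := le21 (k : Int) (by omega)
    rw [g1, g2] at i12 i21
    cases hb1 : f₁[k] <;> cases hb2 : f₂[k] <;> simp_all
  rw [this]

-- ---- A-side characterisation ----
theorem liveOf_getD (g : List String) (t : Int) :
    PySem.List.pyGetD (liveOfG g) t false = (PySem.List.pyGetD g t "" == "@") := by
  have h : ("" == "@") = false := by decide
  rw [liveOfG, ← h, PySem.List.pyGetD_map]

theorem cellTotal_eq (g : List String) (size i : Int) :
    cellTotal g size i = (degM (g.length : Int) size (liveOfG g) i : Int) := by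
  have hbody : ∀ (acc : Int), ∀ j ∈ indexCheck size i,
      (if i + j < 0 ∨ i + j ≥ PySem.List.len g then acc
       else if PySem.List.pyGetD g (i + j) "" == "@" then acc + 1 else acc) =
      (if ((decide (0 ≤ i + j) && decide (i + j < (g.length : Int))) &&
           (PySem.List.pyGetD g (i + j) "" == "@")) = true then acc + 1 else acc) := by
    intro acc j _
    simp only [PySem.List.len_eq, ge_iff_le]
    split_ifs with h1 h2 <;> simp_all <;> omega
  rw [cellTotal, PySem.List.foldl_congr_mem _ _ _ 0 hbody, PySem.List.foldl_if_add_one,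
    degM, nbrCells, List.countP_map, List.countP_filter, zero_add]
  congr 1
  apply List.countP_congr
  intro j _
  simp only [Function.comp_apply, liveOf_getD, Bool.and_eq_true]
  tauto

theorem findRemoves_eq (g : List String) (size : Int) :
    findRemoves g size = (PySem.List.pyRange 0 (g.length : Int) 1).filter
      (fun i => (PySem.List.pyGetD g i "" == "@") && decide (cellTotal g size i < 4)) := by
  have hbody : ∀ (acc : List Int), ∀ i ∈ PySem.List.pyRange 0 (PySem.List.len g) 1,
      (if PySem.List.pyGetD g i "" == "@" then
        if cellTotal g size i < 4 then acc ++ [i] else acc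
       else acc) =
      (if ((PySem.List.pyGetD g i "" == "@") && decide (cellTotal g size i < 4)) = true
       then acc ++ [i] else acc) := by
    intro acc i _
    split_ifs <;> simp_all <;> omega
  rw [findRemoves, PySem.List.foldl_congr_mem _ _ _ [] hbody,
    PySem.List.foldl_append_if_eq_filter]
  simp [PySem.List.len_eq]

theorem mem_findRemoves {g : List String} {size i : Int} :
    i ∈ findRemoves g size ↔ Rm (g.length : Int) size (liveOfG g) i := by
  rw [findRemoves_eq, Rm]
  simp only [List.mem_filter, PySem.List.mem_pyRange_one, Bool.and_eq_true, decide_eq_true_eq,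
    cellTotal_eq, ← liveOf_getD]
  constructor
  · rintro ⟨⟨h0, h1⟩, hl, hd⟩; exact ⟨h0, h1, hl, by exact_mod_cast hd⟩
  · rintro ⟨h0, h1, hl, hd⟩; exact ⟨⟨h0, h1⟩, hl, by exact_mod_cast hd⟩

theorem nodup_findRemoves (g : List String) (size : Int) : (findRemoves g size).Nodup := by
  rw [findRemoves_eq]
  exact (PySem.List.nodup_pyRange_one _ _).filter _

theorem findRemoves_nil {g : List String} {size : Int} :
    findRemoves g size = [] ↔ NoRem (g.length : Int) size (liveOfG g) := by
  rw [List.eq_nil_iff_forall_not_mem]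
  constructor
  · intro h i hr; exact h i (mem_findRemoves.2 hr)
  · intro h i hi; exact h i (mem_findRemoves.1 hi)

theorem removed_commute (r : List Int) (g : List String)
    (hr : ∀ i ∈ r, 0 ≤ i ∧ i < (g.length : Int)) :
    liveOfG (removedFn g r) = r.foldl setF (liveOfG g) ∧ (removedFn g r).length = g.length := by
  induction r generalizing g with
  | nil => exact ⟨rfl, rfl⟩
  | cons i r' ih =>
    have h0 : 0 ≤ i := (hr i List.mem_cons_self).1
    have hstep : liveOfG (PySem.List.pySetD g i ".") = setF (liveOfG g) i := by
      have hb : ("." == "@") = false := by decide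
      rw [setF, PySem.List.pySetD_of_nonneg _ _ h0, PySem.List.pySetD_of_nonneg _ _ h0,
        liveOfG, liveOfG, List.map_set, hb]
    have hlenstep : (PySem.List.pySetD g i ".").length = g.length :=
      PySem.List.length_pySetD g i "."
    have hr' : ∀ j ∈ r', 0 ≤ j ∧ j < ((PySem.List.pySetD g i ".").length : Int) := by
      intro j hj; rw [hlenstep]; exact hr j (List.mem_cons_of_mem _ hj)
    obtain ⟨ihl, ihlen⟩ := ih (PySem.List.pySetD g i ".") hr'
    have hcons : removedFn g (i :: r') = removedFn (PySem.List.pySetD g i ".") r' := rfl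
    refine ⟨?_, ?_⟩
    · rw [hcons, ihl, hstep, List.foldl_cons]
    · rw [hcons, ihlen, hlenstep]

theorem seq_removal {n size : Int} (r : List Int) (live : List Bool) (hnd : r.Nodup)
    (hall : ∀ i ∈ r, Rm n size live i) (hlen : live.length = n.toNat) :
    Relation.ReflTransGen (StepR n size) live (r.foldl setF live) ∧
      lc (r.foldl setF live) + r.length = lc live := by
  induction r generalizing live with
  | nil => exact ⟨Relation.ReflTransGen.refl, by simp⟩
  | cons i r' ih =>
    have hri : Rm n size live i := hall i List.mem_cons_self
    have hstep : StepR n size live (setF live i) := ⟨i, hri, rfl⟩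
    have hle : leL (setF live i) live := step_le hstep
    have hall' : ∀ j ∈ r', Rm n size (setF live i) j := by
      intro j hj
      have hrj := hall j (List.mem_cons_of_mem _ hj)
      have hne : j ≠ i := by
        rintro rfl; exact (List.nodup_cons.1 hnd).1 hj
      refine ⟨hrj.1, hrj.2.1, ?_, ?_⟩
      · rw [getD_setF_other live i j hri.1 hrj.1 hne]; exact hrj.2.2.1
      · exact lt_of_le_of_lt (deg_mono hle j) hrj.2.2.2
    have hlen' : (setF live i).length = n.toNat := by rw [length_setF]; exact hlen
    obtain ⟨hstar, hcount⟩ := ih (setF live i) (List.nodup_cons.1 hnd).2 hall' hlen'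
    refine ⟨Relation.ReflTransGen.head hstep hstar, ?_⟩
    have := step_lc hri hlen
    simp only [List.foldl_cons, List.length_cons]
    omega

theorem part2Loop_nil (size : Int) (fuel : Nat) (g : List String) (total : Int) :
    part2Loop size fuel g [] total = total := by
  cases fuel <;> simp [part2Loop]

theorem aLoop_spec (size : Int) (N : Nat) :
    ∀ (fuel : Nat) (g : List String) (canRem : List Int) (total : Int),
      g.length = N → lc (liveOfG g) + 2 ≤ fuel →
      (canRem = [] → findRemoves g size = []) →
      ∃ f, Relation.ReflTransGen (StepR (N : Int) size) (liveOfG g) f ∧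
        NoRem (N : Int) size f ∧
        part2Loop size fuel g canRem total = total + ((lc (liveOfG g) : Int) - lc f) := by
  intro fuel
  induction fuel with
  | zero => intro g canRem total _ hfuel _; omega
  | succ fuel ih =>
    intro g canRem total hg hfuel hinv
    by_cases hc : canRem.length > 0
    · rw [part2Loop, if_pos hc]
      by_cases hr : findRemoves g size = []
      · have hnr : NoRem ((N : Int)) size (liveOfG g) := by
          have := findRemoves_nil.1 hr
          rwa [hg] at this
        refine ⟨liveOfG g, Relation.ReflTransGen.refl, hnr, ?_⟩
        rw [hr]
        show part2Loop size fuel (removedFn g []) [] (total + PySem.List.len []) = _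
        rw [part2Loop_nil]
        simp [PySem.List.len_eq]
      · set r := findRemoves g size with hrdef
        have hall : ∀ i ∈ r, Rm ((N : Int)) size (liveOfG g) i := by
          intro i hi
          have := mem_findRemoves.1 hi
          rwa [hg] at this
        have hbnd : ∀ i ∈ r, 0 ≤ i ∧ i < (g.length : Int) := by
          intro i hi
          have h := hall i hi
          rw [hg]; exact ⟨h.1, h.2.1⟩
        obtain ⟨hcomm, hlen'⟩ := removed_commute r g hbnd
        have hlenlive : (liveOfG g).length = ((N : Int)).toNat := by
          simp [liveOfG, hg]
        obtain ⟨hstar1, hcount⟩ := seq_removal r (liveOfG g) (nodup_findRemoves g size)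
          hall hlenlive
        have hrlen : 1 ≤ r.length := by
          cases hreq : r with
          | nil => exact absurd hreq hr
          | cons a l => simp
        have hfuel' : lc (liveOfG (removedFn g r)) + 2 ≤ fuel := by
          rw [hcomm]; omega
        have hinv' : r = [] → findRemoves (removedFn g r) size = [] := by
          intro h; exact absurd h hr
        obtain ⟨f, hstar2, hnrem, hval⟩ := ih (removedFn g r) r (total + PySem.List.len r)
          (by rw [hlen', hg]) hfuel' hinv'
        rw [hcomm] at hstar2
        refine ⟨f, hstar1.trans hstar2, hnrem, ?_⟩
        rw [hval, hcomm]
        simp only [PySem.List.len_eq]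
        omega
    · have hnil : canRem = [] := by
        cases canRem with
        | nil => rfl
        | cons a l => simp at hc
      subst hnil
      rw [part2Loop_nil]
      have hnr : NoRem ((N : Int)) size (liveOfG g) := by
        have := findRemoves_nil.1 (hinv rfl)
        rwa [hg] at this
      exact ⟨liveOfG g, Relation.ReflTransGen.refl, hnr, by simp⟩

-- ---- B-side characterisation ----
theorem buildNbrs_eq (g : List String) (size : Int) :
    buildNbrs g size = (PySem.List.pyRange 0 (g.length : Int) 1).map
      (fun i => nbrCells (g.length : Int) size i) := by
  have h1 : buildNbrs g size = (PySem.List.pyRange 0 (g.length : Int) 1).foldl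
      (fun nbrs i => nbrs ++ [((indexCheck size i).filter
        (fun j => decide (0 ≤ i + j) && decide (i + j < (g.length : Int)))).map
        (fun j => i + j)]) [] := rfl
  rw [h1, PySem.List.foldl_append_singleton_eq_map]
  simp [nbrCells]

theorem nbrsAt (g : List String) (size i : Int) (h0 : 0 ≤ i) (h1 : i < (g.length : Int)) :
    PySem.List.pyGetD (buildNbrs g size) i [] = nbrCells (g.length : Int) size i := by
  rw [buildNbrs_eq]
  exact PySem.List.pyGetD_map_pyRange_of_nonneg _ _ _ _ h0 h1

def pairsOf (n : Int) (nbrs : List (List Int)) : List (Int × Int) :=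
  (PySem.List.pyRange 0 n 1).flatMap (fun i => (PySem.List.pyGetD nbrs i []).map (fun t => (t, i)))

theorem revAt (n : Int) (nbrs : List (List Int)) (t : Int) :
    (buildRev n nbrs).getD t [] =
      ((pairsOf n nbrs).filter (fun p => p.1 == t)).map (fun p => p.2) := by
  have h1 : buildRev n nbrs = (pairsOf n nbrs).foldl
      (fun d p => d.modify p.1 [] (fun l => l ++ [p.2])) PySem.Dict.empty := by
    rw [pairsOf, List.foldl_flatMap, buildRev]
    apply PySem.List.foldl_congr_mem
    intro acc i _
    rw [List.foldl_map]
  rw [h1, PySem.Dict.getD_foldl_modify_append, PySem.Dict.getD_empty, List.nil_append]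

theorem mem_revAt (g : List String) (size i j : Int) :
    j ∈ (buildRev (g.length : Int) (buildNbrs g size)).getD i [] ↔
      (0 ≤ j ∧ j < (g.length : Int) ∧ i ∈ nbrCells (g.length : Int) size j) := by
  rw [revAt]
  constructor
  · intro hmem
    obtain ⟨p, hpf, hp2⟩ := List.mem_map.1 hmem
    obtain ⟨hpp, hp1⟩ := List.mem_filter.1 hpf
    obtain ⟨a, ha, hp⟩ := List.mem_flatMap.1 hpp
    obtain ⟨t, ht, rfl⟩ := List.mem_map.1 hp
    obtain ⟨ha0, han⟩ := PySem.List.mem_pyRange_one.1 ha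
    simp only at hp1 hp2
    have ht' : t = i := by simpa using hp1
    subst ht'; subst hp2
    rw [nbrsAt g size a ha0 han] at ht
    exact ⟨ha0, han, ht⟩
  · rintro ⟨h0, h1, hmem⟩
    refine List.mem_map.2 ⟨(i, j), List.mem_filter.2 ⟨?_, by simp⟩, rfl⟩
    refine List.mem_flatMap.2 ⟨j, PySem.List.mem_pyRange_one.2 ⟨h0, h1⟩, ?_⟩
    refine List.mem_map.2 ⟨i, ?_, rfl⟩
    rwa [nbrsAt g size j h0 h1]

def msum (g : List String) (size : Int) (live : List Bool) : Nat :=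
  ((PySem.List.pyRange 0 (g.length : Int) 1).map (fun t =>
    if PySem.List.pyGetD live t false then
      ((buildRev (g.length : Int) (buildNbrs g size)).getD t []).length else 0)).sum

theorem msum_setF (g : List String) (size : Int) (live : List Bool) {i : Int}
    (h0 : 0 ≤ i) (h1 : i < (g.length : Int)) (hlen : live.length = g.length)
    (hlive : PySem.List.pyGetD live i false = true) :
    msum g size (setF live i) +
      ((buildRev (g.length : Int) (buildNbrs g size)).getD i []).length = msum g size live := by
  have hsplit : PySem.List.pyRange 0 (g.length : Int) 1 =
      PySem.List.pyRange 0 i 1 ++ i :: PySem.List.pyRange (i + 1) (g.length : Int) 1 := by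
    rw [PySem.List.pyRange_one_append 0 i _ h0 (le_of_lt h1), PySem.List.pyRange_one_cons h1]
  rw [msum, msum, hsplit]
  simp only [List.map_append, List.map_cons, List.sum_append, List.sum_cons]
  have hleft : (PySem.List.pyRange 0 i 1).map (fun t =>
      if PySem.List.pyGetD (setF live i) t false then
        ((buildRev (g.length : Int) (buildNbrs g size)).getD t []).length else 0) =
      (PySem.List.pyRange 0 i 1).map (fun t =>
      if PySem.List.pyGetD live t false then
        ((buildRev (g.length : Int) (buildNbrs g size)).getD t []).length else 0) := by
    apply List.map_congr_left
    intro t ht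
    obtain ⟨ht0, hti⟩ := PySem.List.mem_pyRange_one.1 ht
    rw [getD_setF_other live i t h0 ht0 (by omega)]
  have hright : (PySem.List.pyRange (i + 1) (g.length : Int) 1).map (fun t =>
      if PySem.List.pyGetD (setF live i) t false then
        ((buildRev (g.length : Int) (buildNbrs g size)).getD t []).length else 0) =
      (PySem.List.pyRange (i + 1) (g.length : Int) 1).map (fun t =>
      if PySem.List.pyGetD live t false then
        ((buildRev (g.length : Int) (buildNbrs g size)).getD t []).length else 0) := by
    apply List.map_congr_left
    intro t ht
    obtain ⟨ht0, hti⟩ := PySem.List.mem_pyRange_one.1 ht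
    rw [getD_setF_other live i t h0 (by omega) (by omega)]
  rw [hleft, hright, getD_setF_self live i h0 (by omega), hlive]
  simp only [Bool.false_eq_true, if_false, if_true]
  omega

theorem sum_ite_count (x : Int) (ts : List Int) :
    (ts.map (fun t => if x == t then (1 : Nat) else 0)).sum = ts.count x := by
  induction ts with
  | nil => simp
  | cons t ts ih =>
    simp only [List.map_cons, List.sum_cons, List.count_cons, ih]
    by_cases h : t = x
    · subst h; simp; omega
    · have h1 : (x == t) = false := by simpa using Ne.symm h
      have h2 : (t == x) = false := by simpa using h
      simp [h1, h2]

theorem sum_countP_le (ts : List Int) (hnd : ts.Nodup) (ps : List (Int × Int)) :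
    (ts.map (fun t => List.countP (fun p => p.1 == t) ps)).sum ≤ ps.length := by
  induction ps with
  | nil => simp
  | cons p ps ih =>
    have hmap : ts.map (fun t => List.countP (fun q => q.1 == t) (p :: ps)) =
        ts.map (fun t => List.countP (fun q => q.1 == t) ps + if p.1 == t then 1 else 0) := by
      apply List.map_congr_left
      intro t _
      rw [List.countP_cons]
    rw [hmap, List.sum_map_add, sum_ite_count, List.length_cons]
    have h2 : ts.count p.1 ≤ 1 := List.nodup_iff_count_le_one.1 hnd _
    omega

theorem length_filter_eq_countP {α : Type} (p : α → Bool) (l : List α) :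
    (l.filter p).length = l.countP p := by
  induction l with
  | nil => rfl
  | cons a l ih => by_cases h : p a <;> simp [h, ih]

theorem pairs_len (g : List String) (size : Int) :
    (pairsOf (g.length : Int) (buildNbrs g size)).length =
      ((buildNbrs g size).map List.length).sum := by
  rw [pairsOf, List.length_flatMap, buildNbrs_eq, List.map_map]
  apply congrArg
  apply List.map_congr_left
  intro a ha
  obtain ⟨h0, h1⟩ := PySem.List.mem_pyRange_one.1 ha
  simp only [Function.comp_apply, List.length_map]
  rw [show PySem.List.pyGetD ((PySem.List.pyRange 0 (g.length : Int) 1).map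
      (fun i => nbrCells (g.length : Int) size i)) a [] = nbrCells (g.length : Int) size a from
    PySem.List.pyGetD_map_pyRange_of_nonneg _ _ _ _ h0 h1]

theorem msum_le (g : List String) (size : Int) (live : List Bool) :
    msum g size live ≤ ((buildNbrs g size).map List.length).sum := by
  have step1 : msum g size live ≤ ((PySem.List.pyRange 0 (g.length : Int) 1).map (fun t =>
      ((buildRev (g.length : Int) (buildNbrs g size)).getD t []).length)).sum := by
    rw [msum]
    apply List.sum_le_sum
    intro t _
    split_ifs <;> omega
  have step2 : ((PySem.List.pyRange 0 (g.length : Int) 1).map (fun t =>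
      ((buildRev (g.length : Int) (buildNbrs g size)).getD t []).length)).sum ≤
      (pairsOf (g.length : Int) (buildNbrs g size)).length := by
    have hmap : (PySem.List.pyRange 0 (g.length : Int) 1).map (fun t =>
        ((buildRev (g.length : Int) (buildNbrs g size)).getD t []).length) =
        (PySem.List.pyRange 0 (g.length : Int) 1).map (fun t =>
        List.countP (fun p => p.1 == t) (pairsOf (g.length : Int) (buildNbrs g size))) := by
      apply List.map_congr_left
      intro t _
      rw [revAt, List.length_map, length_filter_eq_countP]
    rw [hmap]
    exact sum_countP_le _ (PySem.List.nodup_pyRange_one _ _) _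
  calc msum g size live ≤ _ := step1
    _ ≤ _ := step2
    _ = _ := pairs_len g size

theorem deg_strict {n size : Int} {a b : List Bool} {j : Int}
    (h : degM n size a j < degM n size b j) :
    ∃ t ∈ nbrCells n size j, PySem.List.pyGetD b t false = true ∧
      ¬ PySem.List.pyGetD a t false = true := by
  by_contra hno
  push Not at hno
  have : degM n size b j ≤ degM n size a j :=
    List.countP_mono_left (fun t hmem htb => hno t hmem htb)
  omega

theorem bLoop_spec (g : List String) (size : Int) :
    ∀ (fuel : Nat) (live : List Bool) (stack : List Int) (total : Int),
      live.length = g.length →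
      (∀ j ∈ stack, 0 ≤ j ∧ j < (g.length : Int)) →
      (∀ j, Rm (g.length : Int) size live j → j ∈ stack) →
      stack.length + msum g size live + 1 ≤ fuel →
      ∃ f, Relation.ReflTransGen (StepR (g.length : Int) size) live f ∧
        NoRem (g.length : Int) size f ∧
        altLoop (buildNbrs g size) (buildRev (g.length : Int) (buildNbrs g size))
            fuel live stack total = total + ((lc live : Int) - lc f) := by
  intro fuel
  induction fuel with
  | zero => intro live stack total _ _ _ hfuel; omega
  | succ fuel ih =>
    intro live stack total hlen hbd hcomp hfuel
    rcases List.eq_nil_or_concat stack with rfl | ⟨s, i, rfl⟩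
    · refine ⟨live, Relation.ReflTransGen.refl, ?_, ?_⟩
      · intro j hrj; exact absurd (hcomp j hrj) List.not_mem_nil
      · simp [altLoop]
    · simp only [List.concat_eq_append] at hbd hcomp hfuel ⊢
      obtain ⟨hi0, hin⟩ := hbd i (by simp)
      have hnb : PySem.List.pyGetD (buildNbrs g size) i [] = nbrCells (g.length : Int) size i :=
        nbrsAt g size i hi0 hin
      have hcondEq : ((PySem.List.pyGetD (buildNbrs g size) i []).countP
          (fun t => PySem.List.pyGetD live t false)) = degM (g.length : Int) size live i := by
        rw [hnb]; rfl
      have halt : altLoop (buildNbrs g size) (buildRev (g.length : Int) (buildNbrs g size))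
          (fuel + 1) live (s ++ [i]) total =
          if PySem.List.pyGetD live i false = true ∧
             (((PySem.List.pyGetD (buildNbrs g size) i []).countP
               (fun t => PySem.List.pyGetD live t false) : Int) < 4)
          then altLoop (buildNbrs g size) (buildRev (g.length : Int) (buildNbrs g size))
                 fuel (PySem.List.pySetD live i false)
                 (s ++ (buildRev (g.length : Int) (buildNbrs g size)).getD i []) (total + 1)
          else altLoop (buildNbrs g size) (buildRev (g.length : Int) (buildNbrs g size))
                 fuel live s total := by
        simp only [altLoop, List.getLast?_concat, List.dropLast_concat]
      rw [halt]
      by_cases hC : PySem.List.pyGetD live i false = true ∧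
          (((PySem.List.pyGetD (buildNbrs g size) i []).countP
            (fun t => PySem.List.pyGetD live t false) : Int) < 4)
      · rw [if_pos hC]
        have hri : Rm (g.length : Int) size live i := by
          refine ⟨hi0, hin, hC.1, ?_⟩
          have hc2 := hC.2
          rw [hcondEq] at hc2
          exact_mod_cast hc2
        have hstep : StepR (g.length : Int) size live (setF live i) := ⟨i, hri, rfl⟩
        have hlen2 : (setF live i).length = g.length := by rw [length_setF]; exact hlen
        have hbd2 : ∀ j ∈ s ++ (buildRev (g.length : Int) (buildNbrs g size)).getD i [],
            0 ≤ j ∧ j < (g.length : Int) := by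
          intro j hj
          rcases List.mem_append.1 hj with hj | hj
          · exact hbd j (List.mem_append_left _ hj)
          · obtain ⟨h0, h1, -⟩ := (mem_revAt g size i j).1 hj
            exact ⟨h0, h1⟩
        have hcomp2 : ∀ j, Rm (g.length : Int) size (setF live i) j →
            j ∈ s ++ (buildRev (g.length : Int) (buildNbrs g size)).getD i [] := by
          intro j hrj
          have hjlive : PySem.List.pyGetD live j false = true :=
            getD_setF_true_imp hi0 hrj.1 hrj.2.2.1
          by_cases hd : degM (g.length : Int) size live j < 4
          · have hmem := hcomp j ⟨hrj.1, hrj.2.1, hjlive, hd⟩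
            rcases List.mem_append.1 hmem with hmem | hmem
            · exact List.mem_append_left _ hmem
            · exfalso
              have hji : j = i := by simpa using hmem
              subst hji
              have hfalse : PySem.List.pyGetD (setF live j) j false = false :=
                getD_setF_self live j hi0 (by omega)
              rw [hrj.2.2.1] at hfalse
              simp at hfalse
          · have hlt : degM (g.length : Int) size (setF live i) j <
                degM (g.length : Int) size live j := by
              have h4 := hrj.2.2.2
              omega
            obtain ⟨t, htmem, htlive, htdead⟩ := deg_strict hlt
            have ht0 : 0 ≤ t := (mem_nbrCells_bounds htmem).1
            have hti : t = i := by
              by_contra hne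
              rw [getD_setF_other live i t hi0 ht0 hne] at htdead
              exact htdead htlive
            subst hti
            exact List.mem_append_right _ ((mem_revAt g size t j).2 ⟨hrj.1, hrj.2.1, htmem⟩)
        have hmsum : msum g size (setF live i) +
            ((buildRev (g.length : Int) (buildNbrs g size)).getD i []).length =
            msum g size live := msum_setF g size live hi0 hin hlen hC.1
        have hfuel2 : (s ++ (buildRev (g.length : Int) (buildNbrs g size)).getD i []).length +
            msum g size (setF live i) + 1 ≤ fuel := by
          rw [List.length_append]
          simp only [List.length_append, List.length_cons] at hfuel
          omega
        obtain ⟨f, hstar, hnr, hval⟩ := ih (setF live i)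
          (s ++ (buildRev (g.length : Int) (buildNbrs g size)).getD i []) (total + 1)
          hlen2 hbd2 hcomp2 hfuel2
        refine ⟨f, Relation.ReflTransGen.head hstep hstar, hnr, ?_⟩
        have hv2 : altLoop (buildNbrs g size) (buildRev (g.length : Int) (buildNbrs g size))
            fuel (PySem.List.pySetD live i false)
            (s ++ (buildRev (g.length : Int) (buildNbrs g size)).getD i []) (total + 1) =
            (total + 1) + ((lc (setF live i) : Int) - lc f) := hval
        rw [hv2]
        have hstepc : lc (setF live i) + 1 = lc live :=
          step_lc hri (by rw [hlen]; simp)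
        omega
      · rw [if_neg hC]
        have hnotRm : ¬ Rm (g.length : Int) size live i := by
          intro hr
          refine hC ⟨hr.2.2.1, ?_⟩
          rw [hcondEq]
          exact_mod_cast hr.2.2.2
        have hbd2 : ∀ j ∈ s, 0 ≤ j ∧ j < (g.length : Int) := by
          intro j hj; exact hbd j (List.mem_append_left _ hj)
        have hcomp2 : ∀ j, Rm (g.length : Int) size live j → j ∈ s := by
          intro j hrj
          rcases List.mem_append.1 (hcomp j hrj) with hmem | hmem
          · exact hmem
          · exfalso
            have hji : j = i := by simpa using hmem
            subst hji
            exact hnotRm hrj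
        have hfuel2 : s.length + msum g size live + 1 ≤ fuel := by
          simp only [List.length_append, List.length_cons] at hfuel
          omega
        exact ih live s total hlen hbd2 hcomp2 hfuel2

-- ===== VERDICT (by name: the statement is the Claim_ definition above) =====
theorem part2_spec : Claim_equal_part2 := by
  intro test size _ _
  show part2 test size = part2_alt test size
  have hlcle : lc (liveOfG test) ≤ test.length := by
    have h2 : (liveOfG test).length = test.length := by simp [liveOfG]
    calc lc (liveOfG test) ≤ (liveOfG test).length := List.countP_le_length
      _ = test.length := h2
  obtain ⟨f₁, hs1, hn1, hv1⟩ := aLoop_spec size test.length (test.length + 2) test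
    (findRemoves test size) 0 rfl (by omega) (fun h => h)
  have hBdef : part2_alt test size = altLoop (buildNbrs test size)
      (buildRev (test.length : Int) (buildNbrs test size))
      ((PySem.List.pyRange 0 (test.length : Int) 1).length +
        ((buildNbrs test size).map List.length).sum + 1)
      (liveOfG test) (PySem.List.pyRange 0 (test.length : Int) 1) 0 := rfl
  obtain ⟨f₂, hs2, hn2, hv2⟩ := bLoop_spec test size
    ((PySem.List.pyRange 0 (test.length : Int) 1).length +
      ((buildNbrs test size).map List.length).sum + 1)
    (liveOfG test) (PySem.List.pyRange 0 (test.length : Int) 1) 0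
    (by simp [liveOfG])
    (fun j hj => PySem.List.mem_pyRange_one.1 hj)
    (fun j hrj => PySem.List.mem_pyRange_one.2 ⟨hrj.1, hrj.2.1⟩)
    (by have := msum_le test size (liveOfG test); omega)
  have hlenl : (liveOfG test).length = ((test.length : Int)).toNat := by simp [liveOfG]
  have huniq : lc f₁ = lc f₂ := uniq_lc hlenl hs1 hn1 hs2 hn2
  have hA : part2 test size = part2Loop size (test.length + 2) test (findRemoves test size) 0 :=
    rfl
  rw [hA, hv1, hBdef, hv2, huniq]
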